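-- pv_equiv track=rewrite | github.com/quasarbright/quasarbright.github.io | python/my_git/diff.py | character_by_character_diff
-- ===== SOURCE A (Python) =====
-- def next_match(lines1, lines2, start1, start2):
--     '''
--     lines1 and lines2 are [string, ...] no newline
--     start1, start2 are int indices representing the start for each list
--     returns (a index, b index) for next match
--     (-1, -1) if no more matches
--     '''
--     foundMatch = False
--     i1Best = float('inf')
--     i2Best = float('inf')
--     bestDist = float('inf') # (i1best - start1) + (i2best - start2)
--     for i1 in range(start1, len(lines1)):
--         a = lines1[i1]
--         if a in lines2[start2:]:
--             # match
--             foundMatch = True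
--             ain2 = lines2.index(a, start2)
--             dist = (i1 - start1) + (ain2 - start2)
--             if dist < bestDist:
--                 # new best match
--                 i1Best = i1
--                 i2Best = ain2
--                 bestDist = dist
--     for i2 in range(start2, len(lines2)):
--         b = lines2[i2]
--         if b in lines1[start1:]:
--             # match
--             foundMatch = True
--             bin1 = lines1.index(b, start1)
--             dist = (bin1 - start1) + (i2 - start2)
--             if dist < bestDist:
--                 # new best match
--                 i1Best = bin1
--                 i2Best = i2
--                 bestDist = dist
--
--     if foundMatch:
--         return i1Best, i2Best
--     else:
--         return -1, -1
--
-- def character_by_character_diff(s1, s2):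
--     '''
--     expects two strings
--     returns string
--     '''
--     ans = ''
--     i = 0
--     j = 0
--     matchI, matchJ = next_match(s1, s2, i, j)
--     insertions = None
--     deletions = None
--     while i < len(s1) and j < len(s2):
--         if (matchI, matchJ) == (-1, -1):
--             deletions = s1[i:]
--             insertions = s2[j:]
--             if len(deletions) > 0:
--                 ans += "{-"+deletions+"-}"
--             if len(insertions) > 0:
--                 ans += "{+"+insertions+"+}"
--             return ans
--         else:
--             deletions = s1[i:matchI]
--             insertions = s2[j:matchJ]
--             if len(deletions) > 0:
--                 ans += "{-"+deletions+"-}"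
--             if len(insertions) > 0:
--                 ans += "{+"+insertions+"+}"
--             ans += s1[matchI]
--             i = matchI + 1
--             j = matchJ + 1
--         matchI, matchJ = next_match(s1, s2, i, j)
--     return ans
-- ===== SOURCE B (Python) =====
-- def character_by_character_diff(s1, s2):
--     '''
--     expects two strings
--     returns string
--     '''
--     # index: char -> sorted list of its positions in s2
--     positions = {}
--     for k, c in enumerate(s2):
--         positions.setdefault(c, []).append(k)
--
--     def first_ge(lst, j):
--         # first index into lst whose value is >= j (bisect_left by hand)
--         lo, hi = 0, len(lst)
--         while lo < hi:
--             mid = (lo + hi) // 2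
--             if lst[mid] < j:
--                 lo = mid + 1
--             else:
--                 hi = mid
--         return lo
--
--     def find_match(i, j):
--         # best pair (i1, j1) with s1[i1] == s2[j1], i1 >= i, j1 >= j,
--         # minimizing (i1 - i) + (j1 - j), smallest i1 on ties; None if no match
--         best = None  # (dist, i1, j1)
--         for i1 in range(i, len(s1)):
--             if best is not None and i1 - i >= best[0]:
--                 break  # no later i1 can beat the current best distance
--             lst = positions.get(s1[i1], [])
--             p = first_ge(lst, j)
--             if p < len(lst):
--                 j1 = lst[p]
--                 dist = (i1 - i) + (j1 - j)
--                 if best is None or dist < best[0]: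
--                     best = (dist, i1, j1)
--         return None if best is None else (best[1], best[2])
--
--     parts = []
--     i, j = 0, 0
--     while i < len(s1) and j < len(s2):
--         m = find_match(i, j)
--         if m is None:
--             if i < len(s1):
--                 parts.append("{-" + s1[i:] + "-}")
--             if j < len(s2):
--                 parts.append("{+" + s2[j:] + "+}")
--             break
--         mi, mj = m
--         if mi > i:
--             parts.append("{-" + s1[i:mi] + "-}")
--         if mj > j:
--             parts.append("{+" + s2[j:mj] + "+}")
--         parts.append(s1[mi])
--         i, j = mi + 1, mj + 1
--     return "".join(parts)
-- ===== Notes on version B (the rewrite author's own statement) =====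
-- stated objective: faster
-- what changed: B precomputes a dict mapping each character of s2 to its sorted position list and finds the first occurrence >= j by hand-written binary search, replacing A's per-step double scan (slice membership test plus str.index inside two loops); A's redundant second loop over s2 is dropped (it can never improve the first loop's best), the scan over s1 stops early once i1 - i reaches the best distance found, and the output is collected in a parts list joined once.
import Mathlib
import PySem

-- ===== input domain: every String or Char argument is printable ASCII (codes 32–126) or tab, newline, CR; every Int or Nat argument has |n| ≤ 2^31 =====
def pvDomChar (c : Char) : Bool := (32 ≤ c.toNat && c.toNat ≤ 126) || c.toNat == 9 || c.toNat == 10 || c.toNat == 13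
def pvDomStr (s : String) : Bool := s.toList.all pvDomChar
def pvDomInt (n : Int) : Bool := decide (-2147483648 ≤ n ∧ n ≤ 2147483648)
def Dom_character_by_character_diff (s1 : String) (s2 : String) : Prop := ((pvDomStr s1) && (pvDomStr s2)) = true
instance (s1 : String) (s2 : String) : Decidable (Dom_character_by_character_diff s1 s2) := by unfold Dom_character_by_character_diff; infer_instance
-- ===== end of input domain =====

-- B replaces A's per-step double scan of both strings by a precomputed position
-- index with binary search (objective: faster; a timing run measures it).
-- Both ports work on s.toList; all indices are the nonnegative ints of the Python.

-- ===== PORT A =====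

-- 'dist < bestDist' where bestDist may still be float('inf') (modelled as none)
def pvDistLt (d : Int) (bd : Option Int) : Bool :=
  match bd with
  | none => true
  | some x => decide (d < x)

-- loop state (foundMatch, i1Best, i2Best, bestDist); i1Best/i2Best start at 0 in
-- place of float('inf') — Python only reads them after a match set them.
-- body of 'for i1 in range(start1, len(lines1))'; s1[i1] is a single character,
-- so Python's 'a in lines2[start2:]' / 'lines2.index(a, start2)' are character
-- membership and start2 + first index in the dropped tail (guarded, so some).
def nmStep1 (a b : List Char) (st1 st2 : Nat) (st : Bool × Nat × Nat × Option Int)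
    (i1 : Nat) : Bool × Nat × Nat × Option Int :=
  let ach := a.getD i1 ' '
  if ach ∈ b.drop st2 then
    let ain2 := st2 + (PySem.List.index? (b.drop st2) ach).getD 0
    let dist := ((i1 : Int) - (st1 : Int)) + ((ain2 : Int) - (st2 : Int))
    if pvDistLt dist st.2.2.2 then (true, i1, ain2, some dist)
    else (true, st.2.1, st.2.2.1, st.2.2.2)
  else st

-- body of 'for i2 in range(start2, len(lines2))'
def nmStep2 (a b : List Char) (st1 st2 : Nat) (st : Bool × Nat × Nat × Option Int)
    (i2 : Nat) : Bool × Nat × Nat × Option Int :=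
  let bch := b.getD i2 ' '
  if bch ∈ a.drop st1 then
    let bin1 := st1 + (PySem.List.index? (a.drop st1) bch).getD 0
    let dist := ((bin1 : Int) - (st1 : Int)) + ((i2 : Int) - (st2 : Int))
    if pvDistLt dist st.2.2.2 then (true, bin1, i2, some dist)
    else (true, st.2.1, st.2.2.1, st.2.2.2)
  else st

def next_match (a b : List Char) (st1 st2 : Nat) : Int × Int :=
  let st0 : Bool × Nat × Nat × Option Int := (false, 0, 0, none)
  let stA := (List.range' st1 (a.length - st1)).foldl (nmStep1 a b st1 st2) st0
  let stB := (List.range' st2 (b.length - st2)).foldl (nmStep2 a b st1 st2) stA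
  if stB.1 then ((stB.2.1 : Int), (stB.2.2.1 : Int)) else (-1, -1)

-- the while loop; fuel = len(s1)+1 bounds the iteration count (i strictly grows).
-- s1[i:matchI] with 0 ≤ i, 0 ≤ matchI is (drop i).take (matchI - i), Python-exact.
def diffLoopA (a b : List Char) : Nat → Nat → Nat → List Char → List Char
  | 0, _, _, ans => ans
  | fuel + 1, i, j, ans =>
    if i < a.length ∧ j < b.length then
      let m := next_match a b i j
      if m = (-1, -1) then
        let dels := a.drop i
        let ins := b.drop j
        let ans := if dels.length > 0 then ans ++ ['{', '-'] ++ dels ++ ['-', '}'] else ans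
        let ans := if ins.length > 0 then ans ++ ['{', '+'] ++ ins ++ ['+', '}'] else ans
        ans
      else
        -- here m = (↑matchI, ↑matchJ) for the found Nat indices
        let mi := m.1.toNat
        let mj := m.2.toNat
        let dels := (a.drop i).take (mi - i)
        let ins := (b.drop j).take (mj - j)
        let ans := if dels.length > 0 then ans ++ ['{', '-'] ++ dels ++ ['-', '}'] else ans
        let ans := if ins.length > 0 then ans ++ ['{', '+'] ++ ins ++ ['+', '}'] else ans
        let ans := ans ++ [a.getD mi ' ']
        diffLoopA a b fuel (mi + 1) (mj + 1) ans
    else ans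

def character_by_character_diff (s1 : String) (s2 : String) : String :=
  String.ofList (diffLoopA s1.toList s2.toList (s1.toList.length + 1) 0 0 [])

-- ===== PORT B =====

-- hand-written bisect_left loop of Source B (fuel = hi - lo strictly decreases)
def fgLoop (lst : List Nat) (j : Nat) : Nat → Nat → Nat → Nat
  | 0, lo, _ => lo
  | fuel + 1, lo, hi =>
    if lo < hi then
      let mid := (lo + hi) / 2
      if lst.getD mid 0 < j then fgLoop lst j fuel (mid + 1) hi
      else fgLoop lst j fuel lo mid
    else lo

def firstGE (lst : List Nat) (j : Nat) : Nat := fgLoop lst j (lst.length + 1) 0 lst.length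

-- positions.setdefault(c, []).append(k) over enumerate(s2) (indices are ≥ 0)
def buildPositions (b : List Char) : PySem.Dict Char (List Nat) :=
  b.zipIdx.foldl (fun d p => d.modify p.1 [] (· ++ [p.2])) PySem.Dict.empty

-- body of find_match's loop; best = (dist, i1, j1) or None
def fmStep (pos : PySem.Dict Char (List Nat)) (a : List Char) (i j : Nat)
    (best : Option (Int × Nat × Nat)) (i1 : Nat) : Option (Int × Nat × Nat) :=
  let lst := pos.getD (a.getD i1 ' ') []
  let p := firstGE lst j
  if p < lst.length then
    let j1 := lst.getD p 0
    let dist := ((i1 : Int) - (i : Int)) + ((j1 : Int) - (j : Int))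
    match best with
    | none => some (dist, i1, j1)
    | some bb => if dist < bb.1 then some (dist, i1, j1) else best
  else best

-- find_match's loop over i1, with Source B's early break (fuel = remaining indices)
def fmLoop (pos : PySem.Dict Char (List Nat)) (a : List Char) (i j : Nat) :
    Nat → Nat → Option (Int × Nat × Nat) → Option (Int × Nat × Nat)
  | 0, _, best => best
  | fuel + 1, i1, best =>
    if i1 < a.length then
      match best with
      | some bb =>
        if (i1 : Int) - (i : Int) ≥ bb.1 then some bb
        else fmLoop pos a i j fuel (i1 + 1) (fmStep pos a i j (some bb) i1)
      | none => fmLoop pos a i j fuel (i1 + 1) (fmStep pos a i j none i1)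
    else best

def findMatch (pos : PySem.Dict Char (List Nat)) (a : List Char) (i j : Nat) :
    Option (Int × Nat × Nat) :=
  fmLoop pos a i j a.length i none

def diffLoopB (a b : List Char) (pos : PySem.Dict Char (List Nat)) :
    Nat → Nat → Nat → List (List Char) → List (List Char)
  | 0, _, _, parts => parts
  | fuel + 1, i, j, parts =>
    if i < a.length ∧ j < b.length then
      match findMatch pos a i j with
      | none =>
        let parts := if i < a.length then parts ++ [['{', '-'] ++ a.drop i ++ ['-', '}']] else parts
        let parts := if j < b.length then parts ++ [['{', '+'] ++ b.drop j ++ ['+', '}']] else parts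
        parts
      | some (_, mi, mj) =>
        let parts := if i < mi then parts ++ [['{', '-'] ++ (a.drop i).take (mi - i) ++ ['-', '}']] else parts
        let parts := if j < mj then parts ++ [['{', '+'] ++ (b.drop j).take (mj - j) ++ ['+', '}']] else parts
        let parts := parts ++ [[a.getD mi ' ']]
        diffLoopB a b pos fuel (mi + 1) (mj + 1) parts
    else parts

def character_by_character_diff_alt (s1 : String) (s2 : String) : String :=
  let a := s1.toList
  let b := s2.toList
  String.ofList (PySem.Chars.join [] (diffLoopB a b (buildPositions b) (a.length + 1) 0 0 []))

-- ===== PRECONDITION & SPEC =====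
def Spec_character_by_character_diff (s1 : String) (s2 : String) (out : String) : Prop := out = character_by_character_diff_alt s1 s2
instance (s1 : String) (s2 : String) (out : String) : Decidable (Spec_character_by_character_diff s1 s2 out) := by unfold Spec_character_by_character_diff; infer_instance

-- ===== CLAIM (what is proved, stated in full; the proofs are below) =====
def Claim_equal_character_by_character_diff : Prop := ∀ (s1 : String) (s2 : String), Dom_character_by_character_diff s1 s2 → Spec_character_by_character_diff s1 s2 (character_by_character_diff s1 s2)

-- ===== LEMMAS AND PROOFS =====

-- all positions of character c in b, in increasing order
def Pos (b : List Char) (c : Char) : List Nat :=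
  (b.zipIdx.filter (fun p => p.1 == c)).map (·.2)

lemma posD (b : List Char) (c : Char) : (buildPositions b).getD c [] = Pos b c := by
  simp [buildPositions, Pos, PySem.Dict.getD_foldl_modify_append]

lemma mem_Pos (b : List Char) (c : Char) (k : Nat) :
    k ∈ Pos b c ↔ k < b.length ∧ b.getD k ' ' = c := by
  unfold Pos
  rw [List.mem_map]
  constructor
  · rintro ⟨p, hp, rfl⟩
    obtain ⟨hz, hc⟩ := List.mem_filter.mp hp
    have hc' : p.1 = c := by simpa using hc
    have hm : (p.1, p.2) ∈ b.zipIdx := by simpa using hz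
    rw [List.mk_mem_zipIdx_iff_getElem?, hc', List.getElem?_eq_some_iff] at hm
    obtain ⟨hlt, hv⟩ := hm
    exact ⟨hlt, by rw [List.getD_eq_getElem _ _ hlt]; exact hv⟩
  · rintro ⟨hlt, hc⟩
    refine ⟨(c, k), List.mem_filter.mpr ⟨?_, by simp⟩, rfl⟩
    rw [List.mk_mem_zipIdx_iff_getElem?, List.getElem?_eq_some_iff]
    rw [List.getD_eq_getElem _ _ hlt] at hc
    exact ⟨hlt, hc⟩

lemma pos_sorted (b : List Char) (c : Char) : (Pos b c).Pairwise (· < ·) := by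
  have hsub : List.Sublist (Pos b c) (b.zipIdx.map (·.2)) :=
    List.Sublist.map _ List.filter_sublist
  have he : b.zipIdx.map (·.2) = List.range' 0 b.length := by
    simpa using List.zipIdx_map_snd 0 b
  rw [he] at hsub
  exact List.Pairwise.sublist hsub (List.pairwise_lt_range' 1)

lemma sorted_mono (lst : List Nat) (hs : lst.Pairwise (· < ·)) (k k' : Nat)
    (h : k < k') (h' : k' < lst.length) : lst.getD k 0 < lst.getD k' 0 := by
  rw [List.getD_eq_getElem _ _ (by omega), List.getD_eq_getElem _ _ h']
  exact List.pairwise_iff_getElem.mp hs k k' (by omega) h' h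

lemma fgLoop_spec (lst : List Nat) (j : Nat) (hs : lst.Pairwise (· < ·)) :
    ∀ fuel lo hi, lo ≤ hi → hi ≤ lst.length → hi - lo ≤ fuel →
    (∀ k, k < lo → lst.getD k 0 < j) →
    (∀ k, hi ≤ k → k < lst.length → j ≤ lst.getD k 0) →
    lo ≤ fgLoop lst j fuel lo hi ∧ fgLoop lst j fuel lo hi ≤ hi ∧
      (∀ k, k < fgLoop lst j fuel lo hi → lst.getD k 0 < j) ∧
      (∀ k, fgLoop lst j fuel lo hi ≤ k → k < lst.length → j ≤ lst.getD k 0) := by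
  intro fuel
  induction fuel with
  | zero =>
    intro lo hi h1 h2 h3 h4 h5
    have : lo = hi := by omega
    subst this
    exact ⟨le_refl _, le_refl _, h4, h5⟩
  | succ fuel ih =>
    intro lo hi h1 h2 h3 h4 h5
    simp only [fgLoop]
    by_cases hlh : lo < hi
    · simp only [if_pos hlh]
      set mid := (lo + hi) / 2 with hmid
      have hm1 : lo ≤ mid := by omega
      have hm2 : mid < hi := by omega
      by_cases hv : lst.getD mid 0 < j
      · simp only [if_pos hv]
        refine (ih (mid+1) hi (by omega) h2 (by omega) ?_ h5).imp (by omega) (fun x => x)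
        intro k hk
        rcases Nat.lt_or_ge k mid with h | h
        · exact lt_trans (sorted_mono lst hs k mid h (by omega)) hv
        · have : k = mid := by omega
          subst this; exact hv
      · simp only [if_neg hv]
        refine (ih lo mid (by omega) (by omega) (by omega) h4 ?_).imp (fun x => x)
          (fun h => ⟨by omega, h.2⟩)
        intro k hk hk2
        rcases Nat.lt_or_ge mid k with h | h
        · exact le_trans (by omega) (le_of_lt (sorted_mono lst hs mid k h hk2))
        · have : k = mid := by omega
          subst this; omega
    · simp only [if_neg hlh]
      have : lo = hi := by omega
      subst this
      exact ⟨le_refl _, le_refl _, h4, h5⟩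

lemma firstGE_spec (lst : List Nat) (j : Nat) (hs : lst.Pairwise (· < ·)) :
    firstGE lst j ≤ lst.length ∧
      (∀ k, k < firstGE lst j → lst.getD k 0 < j) ∧
      (∀ k, firstGE lst j ≤ k → k < lst.length → j ≤ lst.getD k 0) := by
  have := fgLoop_spec lst j hs (lst.length + 1) 0 lst.length (by omega) (le_refl _)
    (by omega) (by omega) (by omega)
  exact ⟨this.2.1, this.2.2⟩

-- if c occurs in b at j1 ≥ j then the binary search hits, at a position ≤ j1
lemma firstGE_min (b : List Char) (c : Char) (j j1 : Nat)
    (h1 : j ≤ j1) (h2 : j1 < b.length) (h3 : b.getD j1 ' ' = c) :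
    firstGE (Pos b c) j < (Pos b c).length ∧
      (Pos b c).getD (firstGE (Pos b c) j) 0 ≤ j1 := by
  have hs := pos_sorted b c
  obtain ⟨hle, hlt, hge⟩ := firstGE_spec (Pos b c) j hs
  have hmem : j1 ∈ Pos b c := (mem_Pos b c j1).mpr ⟨h2, h3⟩
  obtain ⟨t, ht, hte⟩ := List.mem_iff_getElem.mp hmem
  have htD : (Pos b c).getD t 0 = j1 := by
    rw [List.getD_eq_getElem _ _ ht]; exact hte
  have hpl : firstGE (Pos b c) j < (Pos b c).length := by
    by_contra hnl
    have := hlt t (by omega)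
    omega
  refine ⟨hpl, ?_⟩
  rcases Nat.lt_or_ge t (firstGE (Pos b c) j) with h | h
  · have := hlt t h; omega
  · rcases Nat.eq_or_lt_of_le h with heq | h'
    · rw [heq]; omega
    · have := sorted_mono _ hs _ t h' ht; omega

-- the hit of the binary search is an occurrence of c at an index ≥ j
lemma firstGE_occ (b : List Char) (c : Char) (j : Nat)
    (hpl : firstGE (Pos b c) j < (Pos b c).length) :
    j ≤ (Pos b c).getD (firstGE (Pos b c) j) 0 ∧
      (Pos b c).getD (firstGE (Pos b c) j) 0 < b.length ∧
      b.getD ((Pos b c).getD (firstGE (Pos b c) j) 0) ' ' = c := by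
  have hs := pos_sorted b c
  obtain ⟨hle, hlt, hge⟩ := firstGE_spec (Pos b c) j hs
  have hmem : (Pos b c).getD (firstGE (Pos b c) j) 0 ∈ Pos b c := by
    rw [List.getD_eq_getElem _ _ hpl]; exact List.getElem_mem _
  have hocc := (mem_Pos b c _).mp hmem
  exact ⟨hge _ (le_refl _) hpl, hocc.1, hocc.2⟩

lemma getD_drop (b : List Char) (j r : Nat) (h : j + r < b.length) :
    (b.drop j).getD r ' ' = b.getD (j + r) ' ' := by
  rw [List.getD_eq_getElem _ _ (by simp; omega), List.getD_eq_getElem _ _ h]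
  exact List.getElem_drop ..

lemma mem_drop_iff (b : List Char) (c : Char) (j : Nat) :
    c ∈ b.drop j ↔ ∃ k, j ≤ k ∧ k < b.length ∧ b.getD k ' ' = c := by
  rw [List.mem_iff_getElem]
  constructor
  · rintro ⟨r, hr, he⟩
    have hr' : j + r < b.length := by simp at hr; omega
    refine ⟨j + r, by omega, hr', ?_⟩
    rw [List.getD_eq_getElem _ _ hr', ← List.getElem_drop]
    exact he
  · rintro ⟨k, h1, h2, h3⟩
    refine ⟨k - j, by simp; omega, ?_⟩
    rw [List.getElem_drop]
    rw [List.getD_eq_getElem _ _ h2] at h3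
    simp [show j + (k - j) = k from by omega, h3]

lemma index?_first {xs : List Char} {c : Char} {q : Nat}
    (h : PySem.List.index? xs c = some q) :
    q < xs.length ∧ xs.getD q ' ' = c ∧ ∀ r, r < q → xs.getD r ' ' ≠ c := by
  obtain ⟨pre, suf, rfl, hl, hnp⟩ := (PySem.List.index?_eq_some_iff xs c q).mp h
  subst hl
  refine ⟨by simp, ?_, ?_⟩
  · rw [List.getD_eq_getElem _ _ (by simp)]
    simp
  · intro r hr
    rw [List.getD_eq_getElem _ _ (by simp; omega)]
    rw [List.getElem_append_left (by omega)]
    intro hc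
    exact hnp (hc ▸ List.getElem_mem _)

-- A's way of computing the first occurrence of c in b at an index ≥ j
def aFirst (b : List Char) (c : Char) (j : Nat) : Option Nat :=
  if c ∈ b.drop j then some (j + (PySem.List.index? (b.drop j) c).getD 0) else none

lemma aFirst_eq_some (b : List Char) (c : Char) (j k : Nat) :
    aFirst b c j = some k ↔
      (j ≤ k ∧ k < b.length ∧ b.getD k ' ' = c ∧
        ∀ r, j ≤ r → r < k → b.getD r ' ' ≠ c) := by
  unfold aFirst
  by_cases hm : c ∈ b.drop j
  · simp only [if_pos hm, Option.some_inj]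
    obtain ⟨q, hq⟩ := Option.isSome_iff_exists.mp ((PySem.List.index?_isSome_iff _ c).mpr hm)
    rw [hq]
    simp only [Option.getD_some]
    obtain ⟨hq1, hq2, hq3⟩ := index?_first hq
    have hlen : j + q < b.length := by simp at hq1; omega
    rw [getD_drop _ _ _ hlen] at hq2
    constructor
    · rintro rfl
      refine ⟨by omega, hlen, hq2, ?_⟩
      intro r hr1 hr2
      have := hq3 (r - j) (by omega)
      rw [getD_drop _ _ _ (by omega), show j + (r - j) = r from by omega] at this
      exact this
    · rintro ⟨h1, h2, h3, h4⟩
      rcases Nat.lt_trichotomy (j + q) k with h | h | h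
      · exact absurd hq2 (h4 _ (by omega) h)
      · exact h
      · have := hq3 (k - j) (by omega)
        rw [getD_drop _ _ _ (by omega), show j + (k - j) = k from by omega] at this
        exact absurd h3 this
  · simp only [if_neg hm]
    rw [mem_drop_iff] at hm
    push_neg at hm
    constructor
    · intro h; exact absurd h (by simp)
    · rintro ⟨h1, h2, h3, _⟩
      exact absurd h3 (hm k h1 h2)

lemma aFirst_eq_none (b : List Char) (c : Char) (j : Nat) :
    aFirst b c j = none ↔ ∀ k, j ≤ k → k < b.length → b.getD k ' ' ≠ c := by
  unfold aFirst
  by_cases hm : c ∈ b.drop j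
  · simp only [if_pos hm]
    rw [mem_drop_iff] at hm
    obtain ⟨k, h1, h2, h3⟩ := hm
    constructor
    · intro h; exact absurd h (by simp)
    · intro h; exact absurd h3 (h k h1 h2)
  · simp only [if_neg hm]
    rw [mem_drop_iff] at hm
    push_neg at hm
    exact iff_of_true trivial hm

-- the crux: binary search into the position list computes exactly A's
-- slice-membership test plus first index
lemma firstOcc_eq (b : List Char) (c : Char) (j : Nat) :
    (if firstGE (Pos b c) j < (Pos b c).length
     then some ((Pos b c).getD (firstGE (Pos b c) j) 0)
     else none) = aFirst b c j := by
  by_cases hpl : firstGE (Pos b c) j < (Pos b c).length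
  · rw [if_pos hpl]
    obtain ⟨ho1, ho2, ho3⟩ := firstGE_occ b c j hpl
    symm
    rw [aFirst_eq_some]
    refine ⟨ho1, ho2, ho3, ?_⟩
    intro r hr1 hr2 hc
    have := (firstGE_min b c j r hr1 (by omega) hc).2
    omega
  · rw [if_neg hpl]
    symm
    rw [aFirst_eq_none]
    intro k hk1 hk2 hk3
    exact absurd (firstGE_min b c j k hk1 hk2 hk3).1 hpl


-- decode B's best into A's loop state
def decodeSt : Option (Int × Nat × Nat) → Bool × Nat × Nat × Option Int
  | none => (false, 0, 0, none)
  | some (d, i1, j1) => (true, i1, j1, some d)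

lemma step1_eq (a b : List Char) (i j : Nat) (st : Option (Int × Nat × Nat)) (i1 : Nat) :
    nmStep1 a b i j (decodeSt st) i1 = decodeSt (fmStep (buildPositions b) a i j st i1) := by
  simp only [nmStep1, fmStep]
  rw [posD]
  have hfo := firstOcc_eq b (a.getD i1 ' ') j
  by_cases hpl : firstGE (Pos b (a.getD i1 ' ')) j < (Pos b (a.getD i1 ' ')).length
  · rw [if_pos hpl] at hfo ⊢
    by_cases hm : a.getD i1 ' ' ∈ b.drop j
    · have hsome : aFirst b (a.getD i1 ' ') j =
          some (j + (PySem.List.index? (b.drop j) (a.getD i1 ' ')).getD 0) := by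
        unfold aFirst; rw [if_pos hm]
      rw [hsome] at hfo
      have hval := Option.some_inj.mp hfo
      rw [if_pos hm, ← hval]
      cases st with
      | none => rfl
      | some x =>
        obtain ⟨d, bi, bj⟩ := x
        simp only [decodeSt, pvDistLt, decide_eq_true_eq]
        split_ifs with h <;> rfl
    · have hnone : aFirst b (a.getD i1 ' ') j = none := by
        unfold aFirst; rw [if_neg hm]
      rw [hnone] at hfo
      exact absurd hfo (by simp)
  · rw [if_neg hpl] at hfo ⊢
    by_cases hm : a.getD i1 ' ' ∈ b.drop j
    · have hsome : aFirst b (a.getD i1 ' ') j =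
          some (j + (PySem.List.index? (b.drop j) (a.getD i1 ' ')).getD 0) := by
        unfold aFirst; rw [if_pos hm]
      rw [hsome] at hfo
      exact absurd hfo (by simp)
    · rw [if_neg hm]

lemma loop1_eq_gen (a b : List Char) (i j : Nat) :
    ∀ (l : List Nat) (st : Option (Int × Nat × Nat)),
      l.foldl (nmStep1 a b i j) (decodeSt st) =
        decodeSt (l.foldl (fmStep (buildPositions b) a i j) st) := by
  intro l
  induction l with
  | nil => intro st; rfl
  | cons hd tl ih =>
    intro st
    simp only [List.foldl_cons]
    rw [step1_eq]
    exact ih _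

-- the early break never changes the result: a later candidate cannot win
lemma fmStep_noop (b a : List Char) (i j : Nat) (bb : Int × Nat × Nat) (x : Nat)
    (h : bb.1 ≤ (x : Int) - (i : Int)) :
    fmStep (buildPositions b) a i j (some bb) x = some bb := by
  simp only [fmStep]
  rw [posD]
  by_cases hpl : firstGE (Pos b (a.getD x ' ')) j < (Pos b (a.getD x ' ')).length
  · rw [if_pos hpl]
    have hj := (firstGE_occ b (a.getD x ' ') j hpl).1
    rw [if_neg (by omega : ¬ ((x : Int) - (i : Int)) +
      (((Pos b (a.getD x ' ')).getD (firstGE (Pos b (a.getD x ' ')) j) 0 : Int) - (j : Int)) < bb.1)]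
  · rw [if_neg hpl]

lemma fold_noop (b a : List Char) (i j : Nat) (bb : Int × Nat × Nat) :
    ∀ l : List Nat, (∀ x ∈ l, bb.1 ≤ (x : Int) - (i : Int)) →
      l.foldl (fmStep (buildPositions b) a i j) (some bb) = some bb := by
  intro l
  induction l with
  | nil => intro _; rfl
  | cons hd tl ih =>
    intro h
    simp only [List.foldl_cons, fmStep_noop b a i j bb hd (h hd (by simp))]
    exact ih (fun x hx => h x (by simp [hx]))

lemma fmLoop_eq_fold (b a : List Char) (i j : Nat) :
    ∀ (fuel i1 : Nat) (best : Option (Int × Nat × Nat)), a.length - i1 ≤ fuel →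
      fmLoop (buildPositions b) a i j fuel i1 best =
        (List.range' i1 (a.length - i1)).foldl (fmStep (buildPositions b) a i j) best := by
  intro fuel
  induction fuel with
  | zero =>
    intro i1 best h
    have h0 : a.length - i1 = 0 := by omega
    rw [h0]
    rfl
  | succ fuel ih =>
    intro i1 best h
    simp only [fmLoop]
    by_cases hlt : i1 < a.length
    · rw [if_pos hlt]
      have hsplit : a.length - i1 = (a.length - (i1 + 1)) + 1 := by omega
      rw [hsplit, List.range'_succ]
      cases best with
      | none =>
        simp only [List.foldl_cons]
        exact ih (i1 + 1) _ (by omega)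
      | some bb =>
        simp only []
        by_cases hbreak : (i1 : Int) - (i : Int) ≥ bb.1
        · rw [if_pos hbreak]
          symm
          simp only [List.foldl_cons, fmStep_noop b a i j bb i1 (by omega)]
          apply fold_noop
          intro x hx
          rw [List.mem_range'_1] at hx
          have hxi : (i1 : Int) + 1 ≤ (x : Int) := by exact_mod_cast hx.1
          omega
        · rw [if_neg hbreak]
          simp only [List.foldl_cons]
          exact ih (i1 + 1) _ (by omega)
    · rw [if_neg hlt]
      have h0 : a.length - i1 = 0 := by omega
      rw [h0]
      rfl

-- B's find_match equals the break-free left fold over all remaining indices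
lemma findMatch_eq (b a : List Char) (i j : Nat) :
    findMatch (buildPositions b) a i j =
      (List.range' i (a.length - i)).foldl (fmStep (buildPositions b) a i j) none := by
  rw [findMatch]
  exact fmLoop_eq_fold b a i j a.length i none (by omega)

lemma loop1_eq (a b : List Char) (i j : Nat) :
    (List.range' i (a.length - i)).foldl (nmStep1 a b i j) (false, 0, 0, none) =
      decodeSt (findMatch (buildPositions b) a i j) := by
  have h := loop1_eq_gen a b i j (List.range' i (a.length - i)) none
  rw [findMatch_eq]
  exact h

-- a matching pair at (i1, j1)
def isCand (a b : List Char) (i j i1 j1 : Nat) : Prop :=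
  i ≤ i1 ∧ i1 < a.length ∧ j ≤ j1 ∧ j1 < b.length ∧ a.getD i1 ' ' = b.getD j1 ' '

lemma fm_fold_le (a b : List Char) (i j : Nat) :
    ∀ (l : List Nat) (st : Option (Int × Nat × Nat)) (x : Int × Nat × Nat),
      st = some x →
      ∃ y, l.foldl (fmStep (buildPositions b) a i j) st = some y ∧ y.1 ≤ x.1 := by
  intro l
  induction l with
  | nil => intro st x h; exact ⟨x, by simp [h], le_refl _⟩
  | cons hd tl ih =>
    intro st x h
    subst h
    simp only [List.foldl_cons]
    have hstep : ∃ y0, fmStep (buildPositions b) a i j (some x) hd = some y0 ∧ y0.1 ≤ x.1 := by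
      simp only [fmStep]
      split
      · split
        · next h2 => exact ⟨_, rfl, le_of_lt h2⟩
        · exact ⟨x, rfl, le_refl _⟩
      · exact ⟨x, rfl, le_refl _⟩
    obtain ⟨y0, hy0, hy0le⟩ := hstep
    obtain ⟨y, hy, hyle⟩ := ih _ y0 hy0
    exact ⟨y, hy, le_trans hyle hy0le⟩

lemma fm_fold_occ (a b : List Char) (i j : Nat) :
    ∀ (l : List Nat) (st : Option (Int × Nat × Nat)) (i1 : Nat), i1 ∈ l →
      ∀ j1 : Nat, j ≤ j1 → j1 < b.length → b.getD j1 ' ' = a.getD i1 ' ' →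
      ∃ y, l.foldl (fmStep (buildPositions b) a i j) st = some y ∧
        y.1 ≤ ((i1 : Int) - (i : Int)) + ((j1 : Int) - (j : Int)) := by
  intro l
  induction l with
  | nil => intro st i1 h; exact absurd h (List.not_mem_nil)
  | cons hd tl ih =>
    intro st i1 hmem j1 hj1 hj2 hj3
    rcases List.mem_cons.mp hmem with rfl | htl
    · -- the head processes i1 itself
      simp only [List.foldl_cons]
      obtain ⟨hpl, hk0⟩ := firstGE_min b (a.getD i1 ' ') j j1 hj1 hj2 hj3
      have hstep : ∃ y0, fmStep (buildPositions b) a i j st i1 = some y0 ∧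
          y0.1 ≤ ((i1 : Int) - (i : Int)) + ((j1 : Int) - (j : Int)) := by
        simp only [fmStep]
        rw [posD, if_pos hpl]
        have hdle : ((i1 : Int) - (i : Int)) +
            (((Pos b (a.getD i1 ' ')).getD (firstGE (Pos b (a.getD i1 ' ')) j) 0 : Int) - (j : Int)) ≤
            ((i1 : Int) - (i : Int)) + ((j1 : Int) - (j : Int)) := by omega
        cases st with
        | none => exact ⟨_, rfl, hdle⟩
        | some x =>
          simp only []
          by_cases h2 : ((i1 : Int) - (i : Int)) +
              (((Pos b (a.getD i1 ' ')).getD (firstGE (Pos b (a.getD i1 ' ')) j) 0 : Int) - (j : Int)) < x.1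
          · rw [if_pos h2]
            exact ⟨_, rfl, hdle⟩
          · rw [if_neg h2]
            exact ⟨x, rfl, by omega⟩

      obtain ⟨y0, hy0, hy0le⟩ := hstep
      obtain ⟨y, hy, hyle⟩ := fm_fold_le a b i j tl _ y0 hy0
      exact ⟨y, hy, le_trans hyle hy0le⟩
    · simp only [List.foldl_cons]
      exact ih _ i1 htl j1 hj1 hj2 hj3

lemma fm_min (a b : List Char) (i j : Nat) (d : Int) (bi bj : Nat)
    (h : findMatch (buildPositions b) a i j = some (d, bi, bj)) :
    ∀ i1 j1, isCand a b i j i1 j1 → d ≤ ((i1 : Int) - (i : Int)) + ((j1 : Int) - (j : Int)) := by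
  rintro i1 j1 ⟨h1, h2, h3, h4, h5⟩
  have hmem : i1 ∈ List.range' i (a.length - i) := by
    rw [List.mem_range'_1]
    exact ⟨h1, by omega⟩
  obtain ⟨y, hy, hyle⟩ := fm_fold_occ a b i j _ none i1 hmem j1 h3 h4 h5.symm
  rw [findMatch_eq] at h
  rw [h] at hy
  have : y = (d, bi, bj) := by exact Option.some_inj.mp hy.symm
  rw [this] at hyle
  exact hyle

lemma fm_none (a b : List Char) (i j : Nat)
    (h : findMatch (buildPositions b) a i j = none) :
    ∀ i1 j1, ¬ isCand a b i j i1 j1 := by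
  rintro i1 j1 ⟨h1, h2, h3, h4, h5⟩
  have hmem : i1 ∈ List.range' i (a.length - i) := by
    rw [List.mem_range'_1]
    exact ⟨h1, by omega⟩
  obtain ⟨y, hy, _⟩ := fm_fold_occ a b i j _ none i1 hmem j1 h3 h4 h5.symm
  rw [findMatch_eq] at h
  rw [h] at hy
  exact absurd hy (by simp)

lemma foldl_fix {α β : Type} (f : β → α → β) (st : β) :
    ∀ l : List α, (∀ x ∈ l, f st x = st) → l.foldl f st = st := by
  intro l
  induction l with
  | nil => intro _; rfl
  | cons hd tl ih =>
    intro h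
    simp only [List.foldl_cons, h hd (by simp)]
    exact ih (fun x hx => h x (by simp [hx]))

lemma loop2_id (a b : List Char) (i j : Nat) :
    (List.range' j (b.length - j)).foldl (nmStep2 a b i j)
        (decodeSt (findMatch (buildPositions b) a i j)) =
      decodeSt (findMatch (buildPositions b) a i j) := by
  apply foldl_fix
  intro i2 hi2
  rw [List.mem_range'_1] at hi2
  simp only [nmStep2]
  by_cases hm : b.getD i2 ' ' ∈ a.drop i
  · rw [if_pos hm]
    obtain ⟨q, hq⟩ := Option.isSome_iff_exists.mp
      ((PySem.List.index?_isSome_iff _ (b.getD i2 ' ')).mpr hm)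
    obtain ⟨hq1, hq2, _⟩ := index?_first hq
    have hlen : i + q < a.length := by simp at hq1; omega
    rw [getD_drop _ _ _ hlen] at hq2
    have hcand : isCand a b i j (i + q) i2 :=
      ⟨by omega, hlen, hi2.1, by omega, hq2⟩
    rcases hfm : findMatch (buildPositions b) a i j with _ | ⟨d, bi, bj⟩
    · exact absurd hcand (fm_none a b i j hfm _ _)
    · have hd := fm_min a b i j d bi bj hfm _ _ hcand
      rw [hq]
      simp only [Option.getD_some, decodeSt, pvDistLt, decide_eq_true_eq]
      have hnlt : ¬ (((i + q : Nat) : Int) - (i : Int)) + ((i2 : Int) - (j : Int)) < d := by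
        push_cast at hd ⊢
        omega
      rw [if_neg hnlt]
  · rw [if_neg hm]

lemma nm_eq (a b : List Char) (i j : Nat) :
    next_match a b i j =
      (match findMatch (buildPositions b) a i j with
       | none => (-1, -1)
       | some (_, mi, mj) => ((mi : Int), (mj : Int))) := by
  simp only [next_match]
  rw [loop1_eq, loop2_id]
  rcases findMatch (buildPositions b) a i j with _ | ⟨d, mi, mj⟩
  · rfl
  · rfl

lemma loopA_acc (a b : List Char) (fuel : Nat) :
    ∀ i j ans, diffLoopA a b fuel i j ans = ans ++ diffLoopA a b fuel i j [] := by
  induction fuel with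
  | zero => intro i j ans; simp [diffLoopA]
  | succ fuel ih =>
    intro i j ans
    by_cases hc : i < a.length ∧ j < b.length
    · simp only [diffLoopA, if_pos hc]
      by_cases hm : next_match a b i j = (-1, -1)
      · simp only [if_pos hm]
        split_ifs <;> simp
      · simp only [if_neg hm]
        conv_lhs => rw [ih]
        conv_rhs => rw [ih]
        split_ifs <;> simp
    · simp only [diffLoopA, if_neg hc]
      simp

lemma loopB_acc (a b : List Char) (pos : PySem.Dict Char (List Nat)) (fuel : Nat) :
    ∀ i j parts, diffLoopB a b pos fuel i j parts = parts ++ diffLoopB a b pos fuel i j [] := by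
  induction fuel with
  | zero => intro i j parts; simp [diffLoopB]
  | succ fuel ih =>
    intro i j parts
    by_cases hc : i < a.length ∧ j < b.length
    · simp only [diffLoopB, if_pos hc]
      rcases hm : findMatch pos a i j with _ | ⟨d, mi, mj⟩
      · split_ifs <;> simp
      · simp only []
        conv_lhs => rw [ih]
        conv_rhs => rw [ih]
        split_ifs <;> simp
    · simp only [diffLoopB, if_neg hc]
      simp

lemma main_loop (a b : List Char) (fuel : Nat) :
    ∀ i j, diffLoopA a b fuel i j [] =
      (diffLoopB a b (buildPositions b) fuel i j []).flatten := by
  induction fuel with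
  | zero => intro i j; simp [diffLoopA, diffLoopB]
  | succ fuel ih =>
    intro i j
    by_cases hc : i < a.length ∧ j < b.length
    · simp only [diffLoopA, diffLoopB, if_pos hc]
      rw [nm_eq]
      rcases hfm : findMatch (buildPositions b) a i j with _ | ⟨d, mi, mj⟩
      · simp [hc.1, hc.2]
      · simp only []
        have hne : (((mi : Nat) : Int), ((mj : Nat) : Int)) ≠ ((-1 : Int), (-1 : Int)) := by
          intro h
          have := congrArg Prod.fst h
          simp at this
        rw [if_neg hne]
        simp only [Int.toNat_natCast]
        have hdel : ((a.drop i).take (mi - i)).length > 0 ↔ i < mi := by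
          simp only [List.length_take, List.length_drop]
          omega
        have hins : ((b.drop j).take (mj - j)).length > 0 ↔ j < mj := by
          simp only [List.length_take, List.length_drop]
          omega
        conv_lhs => rw [loopA_acc]
        conv_rhs => rw [loopB_acc]
        rw [ih (mi + 1) (mj + 1)]
        simp only [List.flatten_append]
        by_cases h1 : i < mi <;> by_cases h2 : j < mj
        · rw [if_pos (hdel.mpr h1), if_pos (hins.mpr h2), if_pos h1, if_pos h2]
          simp
        · rw [if_pos (hdel.mpr h1), if_neg (fun h => h2 (hins.mp h)),
            if_pos h1, if_neg h2]
          simp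
        · rw [if_neg (fun h => h1 (hdel.mp h)), if_pos (hins.mpr h2),
            if_neg h1, if_pos h2]
          simp
        · rw [if_neg (fun h => h1 (hdel.mp h)), if_neg (fun h => h2 (hins.mp h)),
            if_neg h1, if_neg h2]
          simp
    · simp only [diffLoopA, diffLoopB, if_neg hc]
      simp

lemma join_nil_eq_flatten (l : List (List Char)) : PySem.Chars.join [] l = l.flatten := by
  induction l with
  | nil => simp [PySem.Chars.join_nil]
  | cons hd tl ih =>
    cases tl with
    | nil => simp [PySem.Chars.join_singleton]
    | cons h2 t2 =>
      rw [PySem.Chars.join_cons_cons, ih]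
      simp

-- ===== VERDICT (by name: the statement is the Claim_ definition above) =====
theorem character_by_character_diff_spec : Claim_equal_character_by_character_diff := by
  intro s1 s2 _
  show character_by_character_diff s1 s2 = character_by_character_diff_alt s1 s2
  unfold character_by_character_diff character_by_character_diff_alt
  simp only []
  rw [join_nil_eq_flatten, main_loop]
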